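-- pv_equiv track=rewrite | github.com/wxdangel-ship-it/RCSD_Topo_Poc | src/rcsd_topo_poc/modules/t02_junction_anchor/stage3_step4_rc_semantics.py | _sorted_unique
-- ===== SOURCE A (Python) =====
-- from typing import Iterable, Sequence
--
-- def _sorted_unique(values: Iterable[str]) -> tuple[str, ...]:
--     return tuple(
--         sorted(
--             {
--                 str(value)
--                 for value in values
--                 if value is not None and str(value).strip()
--             }
--         )
--     )
-- ===== SOURCE B (Python) =====
-- def _sorted_unique(values):
--     out = []
--     for value in values:
--         if value is None:
--             continue
--         s = str(value)
--         if not s.strip():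
--             continue
--         i = 0
--         while i < len(out) and out[i] < s:
--             i += 1
--         if i == len(out) or out[i] != s:
--             out.insert(i, s)
--     return tuple(out)
-- ===== Notes on version B (the rewrite author's own statement) =====
-- stated objective: alternative
-- what changed: Removes both the set comprehension and the sort call: a single pass inserts each kept string into its ordered position in the accumulator by linear scan, skipping strings already present, so the sorted unique result is built incrementally (ordered-insertion) instead of hash-dedup-then-sort.
import Mathlib
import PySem

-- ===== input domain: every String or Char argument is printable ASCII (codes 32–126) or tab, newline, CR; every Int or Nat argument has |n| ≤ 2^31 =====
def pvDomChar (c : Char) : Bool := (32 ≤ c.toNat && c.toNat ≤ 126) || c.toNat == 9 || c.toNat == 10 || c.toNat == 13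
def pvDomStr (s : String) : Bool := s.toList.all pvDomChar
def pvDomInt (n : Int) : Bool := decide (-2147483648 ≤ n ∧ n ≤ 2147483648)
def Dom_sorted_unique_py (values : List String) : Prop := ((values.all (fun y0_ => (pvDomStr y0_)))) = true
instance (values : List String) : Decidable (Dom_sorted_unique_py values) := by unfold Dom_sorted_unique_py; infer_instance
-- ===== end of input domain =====

-- B removes both the set and the sort call: one pass inserting each kept string into its
-- ordered position in the accumulator, skipping duplicates (objective: alternative).

-- ===== PORT A =====
-- A: sorted({str(v) for v in values if v is not None and str(v).strip()})
-- (values are str, so 'v is not None' is True and str(v) = v)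
def sorted_unique_py (values : List String) : List String :=
  PySem.List.sorted
    (PySem.Set.ofList (values.filter (fun v => !(PySem.Str.strip v == ""))))
    (fun x => x) false

-- ===== PORT B =====
-- B's inner while/insert: scan past smaller elements, skip if equal, else insert here.
def insUniq (s : String) : List String → List String
  | [] => [s]
  | x :: xs => if x < s then x :: insUniq s xs
               else if x = s then x :: xs
               else s :: x :: xs

def sorted_unique_py_alt (values : List String) : List String :=
  values.foldl
    (fun out v => if PySem.Str.strip v == "" then out else insUniq v out) []

-- ===== PRECONDITION & SPEC =====
def Spec_sorted_unique_py (values : List String) (out : List String) : Prop := out = sorted_unique_py_alt values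
instance (values : List String) (out : List String) : Decidable (Spec_sorted_unique_py values out) := by unfold Spec_sorted_unique_py; infer_instance

-- ===== CLAIM (what is proved, stated in full; the proofs are below) =====
def Claim_equal_sorted_unique_py : Prop := ∀ (values : List String), Dom_sorted_unique_py values → Spec_sorted_unique_py values (sorted_unique_py values)

-- ===== LEMMAS AND PROOFS =====

theorem mem_insUniq (s x : String) (l : List String) :
    x ∈ insUniq s l ↔ x = s ∨ x ∈ l := by
  induction l with
  | nil => simp [insUniq]
  | cons a t ih =>
    by_cases h1 : a < s
    · simp only [insUniq, if_pos h1, List.mem_cons, ih]; tauto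
    · by_cases h2 : a = s
      · subst h2
        simp [insUniq]
      · simp only [insUniq, if_neg h1, if_neg h2, List.mem_cons]

theorem pairwise_insUniq (s : String) (l : List String)
    (hl : l.Pairwise (· < ·)) : (insUniq s l).Pairwise (· < ·) := by
  induction l with
  | nil => simp [insUniq]
  | cons a t ih =>
    have hat : ∀ z ∈ t, a < z := fun z hz => List.rel_of_pairwise_cons hl hz
    have ht : t.Pairwise (· < ·) := hl.of_cons
    by_cases h1 : a < s
    · simp only [insUniq, if_pos h1]
      refine List.pairwise_cons.mpr ⟨?_, ih ht⟩
      intro z hz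
      rcases (mem_insUniq s z t).mp hz with rfl | hz
      · exact h1
      · exact hat z hz
    · by_cases h2 : a = s
      · simpa [insUniq, h1, h2] using hl
      · have hsa : s < a := lt_of_le_of_ne (not_lt.mp h1) (Ne.symm h2)
        simp only [insUniq, if_neg h1, if_neg h2]
        refine List.pairwise_cons.mpr ⟨?_, hl⟩
        intro z hz
        rcases List.mem_cons.mp hz with rfl | hz
        · exact hsa
        · exact lt_trans hsa (hat z hz)

theorem fold_pairwise (values : List String) :
    ∀ acc : List String, acc.Pairwise (· < ·) →
    (values.foldl (fun out v => if PySem.Str.strip v == "" then out else insUniq v out) acc).Pairwise (· < ·) := by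
  induction values with
  | nil => intro acc h; simpa using h
  | cons v t ih =>
    intro acc h
    simp only [List.foldl_cons]
    by_cases hv : PySem.Str.strip v == ""
    · rw [if_pos hv]; exact ih acc h
    · rw [if_neg hv]; exact ih _ (pairwise_insUniq v acc h)

theorem fold_mem (values : List String) :
    ∀ (acc : List String) (x : String),
    (x ∈ values.foldl (fun out v => if PySem.Str.strip v == "" then out else insUniq v out) acc) ↔
      x ∈ acc ∨ x ∈ values.filter (fun v => !(PySem.Str.strip v == "")) := by
  induction values with
  | nil => intro acc x; simp
  | cons v t ih =>
    intro acc x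
    simp only [List.foldl_cons]
    by_cases hv : PySem.Str.strip v == ""
    · rw [if_pos hv]
      rw [ih acc x]
      have hv' : (!(PySem.Str.strip v == "")) = false := by simp [hv]
      simp only [List.filter_cons, hv', Bool.false_eq_true, if_false]
    · rw [if_neg hv]
      rw [ih (insUniq v acc) x]
      rw [mem_insUniq]
      have hv' : (!(PySem.Str.strip v == "")) = true := by simp [hv]
      simp only [List.filter_cons, hv', if_true, List.mem_cons]
      constructor
      · rintro (⟨rfl | h⟩ | h)
        · exact Or.inr (Or.inl rfl)
        · exact Or.inl h
        · exact Or.inr (Or.inr h)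
      · rintro (h | rfl | h)
        · exact Or.inl (Or.inr h)
        · exact Or.inl (Or.inl rfl)
        · exact Or.inr h

-- ===== VERDICT (by name: the statement is the Claim_ definition above) =====
theorem sorted_unique_py_spec : Claim_equal_sorted_unique_py := by
  intro values _
  unfold Spec_sorted_unique_py sorted_unique_py sorted_unique_py_alt
  set kept := values.filter (fun v => !(PySem.Str.strip v == "")) with hkept
  set D := values.foldl (fun out v => if PySem.Str.strip v == "" then out else insUniq v out) [] with hD
  have hDlt : D.Pairwise (· < ·) := fold_pairwise values [] List.Pairwise.nil
  have hDmem : ∀ x, x ∈ D ↔ x ∈ kept := by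
    intro x; rw [hD, fold_mem values [] x]; simp [hkept]
  have hDnodup : D.Nodup := hDlt.imp ne_of_lt
  have hperm : D.Perm (PySem.Set.ofList kept) := by
    rw [List.perm_ext_iff_of_nodup hDnodup (PySem.Set.nodup_ofList kept)]
    intro x
    rw [hDmem x, PySem.Set.mem_ofList]
  exact PySem.List.sorted_eq_of_perm_of_pairwise_lt (PySem.Set.ofList kept) D (fun x => x) hperm hDlt
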